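-- pv_equiv track=rewrite | github.com/Axel2293/Discrete-Math-Toolkit | OS/MAC OS/FCC-ToolKit.py | vars_list
-- ===== SOURCE A (Python) =====
-- def vars_list(proposition):
--     array=["P","Q","R","S","U","W","X","Y","Z"]
--     li=[]
--     cont=0
--     for i in range(len(proposition)):
--         for l in range(len(array)):
--             if proposition[i] in array[0+l]:
--                 if proposition[i] not in (li):
--                     li.append(proposition[i])
--                 cont+=1
--     return li
-- ===== SOURCE B (Python) =====
-- VARS = "PQRSUWXYZ"
--
--
-- def vars_list(proposition):
--     # Position-indexed approach: one find() per variable letter of the fixed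
--     # alphabet, then order the present letters by their first occurrence.
--     hits = sorted(((proposition.find(v), v) for v in VARS if v in proposition),
--                   key=lambda t: t[0])
--     return [v for _, v in hits]
-- ===== Notes on version B (the rewrite author's own statement) =====
-- stated objective: faster
-- what changed: Instead of scanning the proposition character by character with a nested 9-entry table loop and a seen-list check, B does one str.find per letter of the fixed 9-letter variable alphabet and sorts the present letters by their first-occurrence index.
import Mathlib
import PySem

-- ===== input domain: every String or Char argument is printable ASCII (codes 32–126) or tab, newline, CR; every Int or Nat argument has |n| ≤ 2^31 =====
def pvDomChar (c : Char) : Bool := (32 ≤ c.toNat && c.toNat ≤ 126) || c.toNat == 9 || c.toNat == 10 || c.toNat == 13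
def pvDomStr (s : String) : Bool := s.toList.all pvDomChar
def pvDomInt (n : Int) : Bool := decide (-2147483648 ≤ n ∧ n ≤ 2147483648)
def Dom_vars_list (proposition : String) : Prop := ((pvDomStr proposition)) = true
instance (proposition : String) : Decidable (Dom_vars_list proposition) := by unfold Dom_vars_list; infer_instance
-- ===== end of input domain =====

-- B replaces A's character scan (nested 9-entry table loop plus a seen-list check per
-- character) by one find() per letter of the fixed variable alphabet and a sort of the
-- present letters by first-occurrence index; a timing run measured B faster.

-- ===== PORT A =====
def vars_list (proposition : String) : List String :=
  let array : List String := ["P", "Q", "R", "S", "U", "W", "X", "Y", "Z"]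
  let cs := proposition.toList
  ((PySem.List.pyRange 0 (cs.length : Int) 1).foldl
    (fun (st : List String × Int) i =>
      (PySem.List.pyRange 0 (array.length : Int) 1).foldl
        (fun (st2 : List String × Int) l =>
          if PySem.Str.isIn (String.ofList [PySem.List.pyGetD cs i ' '])
              (PySem.List.pyGetD array (0 + l) "") then
            ((if String.ofList [PySem.List.pyGetD cs i ' '] ∈ st2.1 then st2.1
              else st2.1 ++ [String.ofList [PySem.List.pyGetD cs i ' ']]), st2.2 + 1)
          else st2)
        st)
    (([], 0) : List String × Int)).1

-- ===== PORT B =====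
def pvVarChars : List Char := ['P', 'Q', 'R', 'S', 'U', 'W', 'X', 'Y', 'Z']

def vars_list_alt (proposition : String) : List String :=
  (PySem.List.sorted
      ((pvVarChars.filter (fun v => PySem.Str.isIn (String.ofList [v]) proposition)).map
        (fun v => (PySem.Str.find proposition (String.ofList [v]), String.ofList [v])))
      (fun t => t.1) false).map (fun t => t.2)

-- ===== PRECONDITION & SPEC =====
def Spec_vars_list (proposition : String) (out : List String) : Prop := out = vars_list_alt proposition
instance (proposition : String) (out : List String) : Decidable (Spec_vars_list proposition out) := by unfold Spec_vars_list; infer_instance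

-- ===== CLAIM (what is proved, stated in full; the proofs are below) =====
def Claim_equal_vars_list : Prop := ∀ (proposition : String), Dom_vars_list proposition → Spec_vars_list proposition (vars_list proposition)

-- ===== LEMMAS AND PROOFS =====

-- the variable alphabet as a set, for the canonical middle form both ports are reduced to
def pvVARS : PySem.Set Char := PySem.Set.ofList pvVarChars

-- 'sub in s' for two one-character strings is character equality
theorem pv_chars_isIn_single (c d : Char) : PySem.Chars.isIn [c] [d] = (c == d) := by
  rcases Bool.eq_false_or_eq_true (c == d) with h | h
  · rw [h, PySem.Chars.isIn_iff_infix]; simp_all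
  · rw [h, ← Bool.not_eq_true, PySem.Chars.isIn_iff_infix]; simp_all

theorem pv_ofList_single_inj (c d : Char) :
    (String.ofList [c] = String.ofList [d]) ↔ c = d := by
  constructor
  · intro h; have := congrArg String.toList h; simpa using this
  · intro h; rw [h]

theorem pv_mem_map_single (c : Char) (l : List Char) :
    (String.ofList [c] ∈ l.map (fun d => String.ofList [d])) ↔ c ∈ l := by
  simp [List.mem_map, pv_ofList_single_inj, eq_comm]

-- A's inner loop over the 9-element variable table, characterised
theorem pv_inner_step (st : List String × Int) (c : Char) :
    (["P", "Q", "R", "S", "U", "W", "X", "Y", "Z"] : List String).foldl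
      (fun (st2 : List String × Int) a =>
        if PySem.Str.isIn (String.ofList [c]) a then
          ((if String.ofList [c] ∈ st2.1 then st2.1
            else st2.1 ++ [String.ofList [c]]), st2.2 + 1)
        else st2) st
    = if PySem.Set.contains pvVARS c then
        ((if String.ofList [c] ∈ st.1 then st.1 else st.1 ++ [String.ofList [c]]), st.2 + 1)
      else st := by
  by_cases h1 : c = 'P'; · subst h1; simp [pv_chars_isIn_single, pvVARS, pvVarChars]
  by_cases h2 : c = 'Q'; · subst h2; simp [pv_chars_isIn_single, pvVARS, pvVarChars]
  by_cases h3 : c = 'R'; · subst h3; simp [pv_chars_isIn_single, pvVARS, pvVarChars]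
  by_cases h4 : c = 'S'; · subst h4; simp [pv_chars_isIn_single, pvVARS, pvVarChars]
  by_cases h5 : c = 'U'; · subst h5; simp [pv_chars_isIn_single, pvVARS, pvVarChars]
  by_cases h6 : c = 'W'; · subst h6; simp [pv_chars_isIn_single, pvVARS, pvVarChars]
  by_cases h7 : c = 'X'; · subst h7; simp [pv_chars_isIn_single, pvVARS, pvVarChars]
  by_cases h8 : c = 'Y'; · subst h8; simp [pv_chars_isIn_single, pvVARS, pvVarChars]
  by_cases h9 : c = 'Z'; · subst h9; simp [pv_chars_isIn_single, pvVARS, pvVarChars]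
  simp [pv_chars_isIn_single, pvVARS, pvVarChars, h1, h2, h3, h4, h5, h6, h7, h8, h9]

-- A's main loop invariant: the accumulator is the filter-map of the set of seen characters
theorem pv_main (cs : List Char) :
    ∀ (s : PySem.Set Char) (n : Int),
      (cs.foldl
        (fun (st : List String × Int) c =>
          if PySem.Set.contains pvVARS c then
            ((if String.ofList [c] ∈ st.1 then st.1 else st.1 ++ [String.ofList [c]]), st.2 + 1)
          else st)
        (((s.filter (fun c => PySem.Set.contains pvVARS c)).map (fun c => String.ofList [c])), n)).1
      = ((cs.foldl PySem.Set.add s).filter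
          (fun c => PySem.Set.contains pvVARS c)).map (fun c => String.ofList [c]) := by
  induction cs with
  | nil => intro s n; rfl
  | cons c cs ih =>
    intro s n
    simp only [List.foldl_cons]
    by_cases hc : PySem.Set.contains pvVARS c = true
    · rw [if_pos hc]
      by_cases hm : c ∈ s
      · have hmem : String.ofList [c] ∈ (s.filter (fun d => PySem.Set.contains pvVARS d)).map (fun d => String.ofList [d]) := by
          rw [pv_mem_map_single]; exact List.mem_filter.mpr ⟨hm, hc⟩
        rw [if_pos hmem, PySem.Set.add_of_mem hm]
        exact ih s (n + 1)
      · have hmem : String.ofList [c] ∉ (s.filter (fun d => PySem.Set.contains pvVARS d)).map (fun d => String.ofList [d]) := by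
          rw [pv_mem_map_single]; intro h; exact hm (List.mem_filter.mp h).1
        rw [if_neg hmem, PySem.Set.add_of_not_mem hm]
        have : ((s ++ [c]).filter (fun d => PySem.Set.contains pvVARS d)).map (fun d => String.ofList [d])
            = (s.filter (fun d => PySem.Set.contains pvVARS d)).map (fun d => String.ofList [d]) ++ [String.ofList [c]] := by
          simp only [List.filter_append]
          rw [List.map_append]
          have hc' : c ∈ pvVARS := by simpa using hc
          simp [hc']
        rw [← this] at *
        exact ih (s ++ [c]) (n + 1)
    · rw [if_neg hc]
      have hfilt : (PySem.Set.add s c).filter (fun d => PySem.Set.contains pvVARS d)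
          = s.filter (fun d => PySem.Set.contains pvVARS d) := by
        by_cases hm : c ∈ s
        · rw [PySem.Set.add_of_mem hm]
        · rw [PySem.Set.add_of_not_mem hm]
          simp only [List.filter_append]
          have hc2 : c ∉ pvVARS := by
            intro h
            exact hc (by simpa using h)
          have h0 : List.filter (fun d => PySem.Set.contains pvVARS d) [c] = [] := by
            simp [hc2]
          rw [h0, List.append_nil]
      have h2 := ih (PySem.Set.add s c) n
      rw [hfilt] at h2
      exact h2

-- A computes the canonical middle form: the in-order distinct variable letters of the input
theorem pv_A_eq (p : String) :
    vars_list p =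
      ((PySem.List.dedup p.toList).filter (fun c => PySem.Set.contains pvVARS c)).map
        (fun c => String.ofList [c]) := by
  unfold vars_list
  simp only [zero_add]
  have hinner : ∀ (st : List String × Int) (i : Int),
      (PySem.List.pyRange 0 (((["P", "Q", "R", "S", "U", "W", "X", "Y", "Z"] : List String).length : Int)) 1).foldl
        (fun (st2 : List String × Int) l =>
          if PySem.Str.isIn (String.ofList [PySem.List.pyGetD p.toList i ' '])
              (PySem.List.pyGetD (["P", "Q", "R", "S", "U", "W", "X", "Y", "Z"] : List String) l "") then
            ((if String.ofList [PySem.List.pyGetD p.toList i ' '] ∈ st2.1 then st2.1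
              else st2.1 ++ [String.ofList [PySem.List.pyGetD p.toList i ' ']]), st2.2 + 1)
          else st2) st
      = if PySem.Set.contains pvVARS (PySem.List.pyGetD p.toList i ' ') then
          ((if String.ofList [PySem.List.pyGetD p.toList i ' '] ∈ st.1 then st.1
            else st.1 ++ [String.ofList [PySem.List.pyGetD p.toList i ' ']]), st.2 + 1)
        else st := by
    intro st i
    rw [PySem.List.foldl_pyRange_zero_pyGetD' (["P", "Q", "R", "S", "U", "W", "X", "Y", "Z"] : List String) ""
      (fun (st2 : List String × Int) a =>
        if PySem.Str.isIn (String.ofList [PySem.List.pyGetD p.toList i ' ']) a then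
          ((if String.ofList [PySem.List.pyGetD p.toList i ' '] ∈ st2.1 then st2.1
            else st2.1 ++ [String.ofList [PySem.List.pyGetD p.toList i ' ']]), st2.2 + 1)
        else st2) st]
    exact pv_inner_step st (PySem.List.pyGetD p.toList i ' ')
  simp only [hinner]
  rw [PySem.List.foldl_pyRange_zero_pyGetD' p.toList ' '
    (fun (st : List String × Int) c =>
      if PySem.Set.contains pvVARS c then
        ((if String.ofList [c] ∈ st.1 then st.1 else st.1 ++ [String.ofList [c]]), st.2 + 1)
      else st) (([], 0) : List String × Int)]
  have h := pv_main p.toList [] 0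
  simpa [PySem.List.dedup_eq_ofList, PySem.Set.ofList_eq_foldl] using h

-- ===== B-side lemmas =====

theorem pv_singleton_infix (v : Char) (s : List Char) : [v] <:+: s ↔ v ∈ s := by
  constructor
  · intro h; exact h.mem (List.mem_singleton_self v)
  · intro h
    obtain ⟨a, b, rfl⟩ := List.mem_iff_append.mp h
    exact ⟨a, b, by simp⟩

theorem pv_isIn_mem (v : Char) (s : List Char) : PySem.Chars.isIn [v] s = decide (v ∈ s) := by
  by_cases h : v ∈ s
  · simp only [h, decide_true]
    rw [PySem.Chars.isIn_iff_infix]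
    exact (pv_singleton_infix v s).mpr h
  · simp only [h, decide_false]
    rw [PySem.Chars.isIn_eq_false_iff]
    exact fun hi => h ((pv_singleton_infix v s).mp hi)

-- idxOf is minimal among positions carrying the value
theorem pv_idxOf_le (c : Char) (l : List Char) : ∀ j (hj : j < l.length), l[j] = c → l.idxOf c ≤ j := by
  induction l with
  | nil => intro j hj; simp at hj
  | cons a t ih =>
    intro j hj he
    by_cases hac : a = c
    · simp [hac, List.idxOf_cons_self]
    · cases j with
      | zero => simp at he; exact absurd he hac
      | succ k =>
        rw [List.idxOf_cons_ne _ (by simpa using hac)]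
        exact Nat.succ_le_succ (ih k (by simpa using hj) (by simpa using he))

theorem pv_idxOf_append_sing (c : Char) (l : List Char) (h : c ∉ l) : (l ++ [c]).idxOf c = l.length := by
  induction l with
  | nil => simp
  | cons a t ih =>
    have hac : ¬ a = c := fun he => h (he ▸ List.mem_cons_self)
    rw [List.cons_append, List.idxOf_cons_ne _ (by simpa using hac),
      ih (fun hm => h (List.mem_cons_of_mem a hm))]
    simp

-- s.find(v) for a single present character is its first-occurrence index
theorem pv_find_singleton (cs : List Char) (c : Char) (h : c ∈ cs) :
    PySem.Chars.find cs [c] = (cs.idxOf c : Int) := by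
  have h0 : 0 ≤ PySem.Chars.find cs [c] := by
    rw [PySem.Chars.find_nonneg_iff]
    exact (pv_singleton_infix c cs).mpr h
  obtain ⟨hpre, hmin⟩ := PySem.Chars.find_spec h0
  obtain ⟨t', ht⟩ := hpre
  have hklen : (PySem.Chars.find cs [c]).toNat < cs.length := by
    by_contra hge
    rw [List.drop_eq_nil_of_le (le_of_not_gt hge)] at ht
    simp at ht
  have hget : cs[(PySem.Chars.find cs [c]).toNat] = c := by
    rw [List.drop_eq_getElem_cons hklen] at ht
    have : c :: t' = cs[(PySem.Chars.find cs [c]).toNat] :: cs.drop ((PySem.Chars.find cs [c]).toNat + 1) := ht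
    injection this with h1 _
    exact h1.symm
  have hle : cs.idxOf c ≤ (PySem.Chars.find cs [c]).toNat := pv_idxOf_le c cs _ hklen hget
  have hge2 : (PySem.Chars.find cs [c]).toNat ≤ cs.idxOf c := by
    by_contra hlt
    push Not at hlt
    refine hmin _ hlt ⟨cs.drop (cs.idxOf c + 1), ?_⟩
    rw [List.drop_eq_getElem_cons (List.idxOf_lt_length_of_mem h), List.getElem_idxOf]
    rfl
  omega

-- the dedup (first-occurrence) list is strictly increasing in first-occurrence index
theorem pv_dedup_pairwise (cs : List Char) :
    (PySem.List.dedup cs).Pairwise (fun a b => cs.idxOf a < cs.idxOf b) := by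
  induction cs using List.reverseRecOn with
  | nil => simp [PySem.List.dedup_eq_ofList]
  | append_singleton t c ih =>
    have hstep : PySem.List.dedup (t ++ [c]) =
        if PySem.Set.contains (PySem.List.dedup t) c then PySem.List.dedup t
        else PySem.List.dedup t ++ [c] := by
      rw [PySem.List.dedup_eq_ofList, PySem.List.dedup_eq_ofList, PySem.Set.ofList_eq_foldl,
        PySem.Set.ofList_eq_foldl, List.foldl_append]
      rfl
    have hcont : PySem.Set.contains (PySem.List.dedup t) c = true ↔ c ∈ t := by
      rw [PySem.Set.contains_iff]
      exact PySem.List.mem_dedup t c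
    by_cases hc : c ∈ t
    · rw [hstep, if_pos (hcont.mpr hc)]
      exact ih.imp_of_mem (fun {a b} ha hb hab => by
        rw [List.idxOf_append_of_mem ((PySem.List.mem_dedup t a).mp ha),
          List.idxOf_append_of_mem ((PySem.List.mem_dedup t b).mp hb)]
        exact hab)
    · rw [hstep, if_neg (fun hh => hc (hcont.mp hh))]
      rw [List.pairwise_append]
      refine ⟨ih.imp_of_mem (fun {a b} ha hb hab => by
          rw [List.idxOf_append_of_mem ((PySem.List.mem_dedup t a).mp ha),
            List.idxOf_append_of_mem ((PySem.List.mem_dedup t b).mp hb)]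
          exact hab),
        List.pairwise_singleton _ _, ?_⟩
      intro a ha b hb
      have hb' : b = c := List.mem_singleton.mp hb
      have hat : a ∈ t := (PySem.List.mem_dedup t a).mp ha
      rw [hb', List.idxOf_append_of_mem hat, pv_idxOf_append_sing c t hc]
      exact List.idxOf_lt_length_of_mem hat

-- B computes the same canonical middle form
theorem pv_B_eq (p : String) :
    vars_list_alt p =
      ((PySem.List.dedup p.toList).filter (fun c => PySem.Set.contains pvVARS c)).map
        (fun c => String.ofList [c]) := by
  unfold vars_list_alt
  have hhits : (pvVarChars.filter (fun v => PySem.Str.isIn (String.ofList [v]) p)).map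
        (fun v => (PySem.Str.find p (String.ofList [v]), String.ofList [v]))
      = (pvVarChars.filter (fun v => decide (v ∈ p.toList))).map
        (fun v => ((p.toList.idxOf v : Int), String.ofList [v])) := by
    have h1 : ∀ v ∈ pvVarChars, PySem.Str.isIn (String.ofList [v]) p = decide (v ∈ p.toList) := by
      intro v _
      have : PySem.Str.isIn (String.ofList [v]) p = PySem.Chars.isIn [v] p.toList := by simp
      rw [this, pv_isIn_mem]
    rw [List.filter_congr h1]
    apply List.map_congr_left
    intro v hv
    have hvmem : v ∈ p.toList := by simpa using (List.mem_filter.mp hv).2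
    have h2 : PySem.Str.find p (String.ofList [v]) = PySem.Chars.find p.toList [v] := by simp
    rw [h2, pv_find_singleton _ _ hvmem]
  rw [hhits]
  have hperm : (((PySem.List.dedup p.toList).filter (fun c => PySem.Set.contains pvVARS c)).map
        (fun c => ((p.toList.idxOf c : Int), String.ofList [c]))).Perm
      ((pvVarChars.filter (fun v => decide (v ∈ p.toList))).map
        (fun v => ((p.toList.idxOf v : Int), String.ofList [v]))) := by
    apply List.Perm.map
    apply (List.perm_ext_iff_of_nodup
      ((PySem.List.nodup_dedup p.toList).filter _)
      ((by decide : pvVarChars.Nodup).filter _)).mpr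
    intro a
    simp only [List.mem_filter, PySem.List.mem_dedup, PySem.Set.contains_iff, pvVARS,
      PySem.Set.mem_ofList, decide_eq_true_eq]
    exact ⟨fun ⟨h1, h2⟩ => ⟨h2, h1⟩, fun ⟨h1, h2⟩ => ⟨h2, h1⟩⟩
  have hpair : (((PySem.List.dedup p.toList).filter (fun c => PySem.Set.contains pvVARS c)).map
        (fun c => ((p.toList.idxOf c : Int), String.ofList [c]))).Pairwise
      (fun a b => a.1 < b.1) := by
    rw [List.pairwise_map]
    exact ((pv_dedup_pairwise p.toList).filter _).imp (fun hab => by simpa using hab)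
  rw [PySem.List.sorted_eq_of_perm_of_pairwise_lt _ _ _ hperm hpair]
  simp [List.map_map, Function.comp_def]

-- ===== VERDICT (by name: the statement is the Claim_ definition above) =====
theorem vars_list_spec : Claim_equal_vars_list := by
  intro p _
  unfold Spec_vars_list
  rw [pv_A_eq p, pv_B_eq p]
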